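-- pv_equiv track=rewrite | github.com/SaraFarmahini/afd | afm.py | longest_descending
-- ===== SOURCE A (Python) =====
-- def longest_descending(data, tolerance=3):
--     # For series=1, so if you're only interested in my algorithm series = 0, please ignore it and go to the next function.
--     #I used my previous code for series1, since the new algorithm does not define the wanted slope for series 1.
--
--     d, f = data
--     longest_segment_d = []
--     longest_segment_f = []
--     max_length = 0
--
--     start = 0
--     while start < len(d) - 1:
--         segment_length = 0
--         fluctuation = 0
--         current = start
--
--         while current < len(d) - 1:
--             if f[current] > f[current + 1]:
--                 fluctuation = 0
--             else:
--                 fluctuation += 1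
--
--             segment_length += 1
--
--             if fluctuation >= tolerance:
--                 break
--
--             current += 1
--
--         if segment_length > max_length:
--             max_length = segment_length
--             longest_segment_d = d[start:start + segment_length]
--             longest_segment_f = f[start:start + segment_length]
--
--         start += max(segment_length, 1)
--
--     longest_segment = (longest_segment_d, longest_segment_f)
--
--     return longest_segment
-- ===== SOURCE B (Python) =====
-- def longest_descending(data, tolerance=3):
--     # One linear sweep: close a segment when fluctuation reaches tolerance,
--     # then close the trailing partial segment after the loop.
--     d, f = data
--     best = ([], [])
--     max_len = 0
--     seg_start = 0
--     length = 0
--     fluct = 0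
--     for i in range(len(d) - 1):
--         fluct = 0 if f[i] > f[i + 1] else fluct + 1
--         length += 1
--         if fluct >= tolerance:
--             if length > max_len:
--                 max_len = length
--                 best = (d[seg_start:seg_start + length], f[seg_start:seg_start + length])
--             seg_start = i + 1
--             length = 0
--             fluct = 0
--     if length > max_len:
--         best = (d[seg_start:seg_start + length], f[seg_start:seg_start + length])
--     return best
-- ===== Notes on version B (the rewrite author's own statement) =====
-- stated objective: simpler
-- what changed: Collapses A's nested restart loops (outer while re-running an inner scan from each segment start) into a single linear for-sweep that maintains seg_start/length/fluctuation, closing a segment inline when fluctuation reaches tolerance and closing the trailing segment after the loop.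
import Mathlib
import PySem

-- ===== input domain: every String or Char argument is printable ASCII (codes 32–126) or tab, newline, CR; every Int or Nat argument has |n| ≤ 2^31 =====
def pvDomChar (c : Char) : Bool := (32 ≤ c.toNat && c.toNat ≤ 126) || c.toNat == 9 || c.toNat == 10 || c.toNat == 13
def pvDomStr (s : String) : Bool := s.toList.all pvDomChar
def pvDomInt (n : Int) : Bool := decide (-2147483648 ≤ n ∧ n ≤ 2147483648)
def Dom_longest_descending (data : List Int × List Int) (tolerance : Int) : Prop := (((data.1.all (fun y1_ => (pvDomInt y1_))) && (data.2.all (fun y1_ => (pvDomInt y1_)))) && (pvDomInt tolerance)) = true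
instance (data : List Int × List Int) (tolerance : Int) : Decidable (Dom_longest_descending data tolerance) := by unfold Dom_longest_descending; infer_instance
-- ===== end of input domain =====

-- ===== PORT A =====
-- B collapses A's nested restart loops into one linear sweep (objective: simpler); A indexes f up to len(d)-1, so Pre_ requires len(f) ≥ len(d) (else Python raises IndexError).
-- inner 'while current < len(d) - 1' of A; only segment_length survives the loop
def innerA (f : List Int) (limit : Nat) (tol : Int) (current : Nat) (fluct : Int) (seg : Nat) : Nat :=
  if _h : current < limit then
    -- f[current] > f[current+1]: in-range under Pre_, so getD is exact there
    let fluct' := if f.getD current 0 > f.getD (current + 1) 0 then 0 else fluct + 1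
    let seg' := seg + 1
    if fluct' ≥ tol then seg'
    else innerA f limit tol (current + 1) fluct' seg'
  else seg
termination_by limit - current

-- outer 'while start < len(d) - 1' of A; limit = len(d) - 1 (Nat clamp agrees: loop never runs for len(d) ≤ 1)
def outerA (d f : List Int) (limit : Nat) (tol : Int) (start : Nat) (maxLen : Nat) (bd bf : List Int) : List Int × List Int :=
  if _h : start < limit then
    let seg := innerA f limit tol start 0 0
    let maxLen' := if seg > maxLen then seg else maxLen
    let bd' := if seg > maxLen then PySem.List.slice d (some (start : Int)) (some ((start : Int) + (seg : Int))) else bd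
    let bf' := if seg > maxLen then PySem.List.slice f (some (start : Int)) (some ((start : Int) + (seg : Int))) else bf
    outerA d f limit tol (start + max seg 1) maxLen' bd' bf'
  else (bd, bf)
termination_by limit - start

def longest_descending (data : List Int × List Int) (tolerance : Int) : List Int × List Int :=
  outerA data.1 data.2 (data.1.length - 1) tolerance 0 0 [] []

-- ===== PORT B =====
-- the single 'for i in range(len(d) - 1)' loop of Source B; returns (seg_start, length, max_len, best)
def loopB (d f : List Int) (limit : Nat) (tol : Int) (i segStart length : Nat) (fluct : Int)
    (maxLen : Nat) (best : List Int × List Int) : Nat × Nat × Nat × (List Int × List Int) :=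
  if _h : i < limit then
    let fluct' := if f.getD i 0 > f.getD (i + 1) 0 then 0 else fluct + 1
    let len' := length + 1
    if fluct' ≥ tol then
      let maxLen' := if len' > maxLen then len' else maxLen
      let best' := if len' > maxLen then
          (PySem.List.slice d (some (segStart : Int)) (some ((segStart : Int) + (len' : Int))),
           PySem.List.slice f (some (segStart : Int)) (some ((segStart : Int) + (len' : Int))))
        else best
      loopB d f limit tol (i + 1) (i + 1) 0 0 maxLen' best'
    else loopB d f limit tol (i + 1) segStart len' fluct' maxLen best
  else (segStart, length, maxLen, best)
termination_by limit - i

def longest_descending_alt (data : List Int × List Int) (tolerance : Int) : List Int × List Int :=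
  let d := data.1
  let f := data.2
  let r := loopB d f (d.length - 1) tolerance 0 0 0 0 0 ([], [])
  -- trailing close: 'if length > max_len: best = slices'
  if r.2.1 > r.2.2.1 then
    (PySem.List.slice d (some (r.1 : Int)) (some ((r.1 : Int) + (r.2.1 : Int))),
     PySem.List.slice f (some (r.1 : Int)) (some ((r.1 : Int) + (r.2.1 : Int))))
  else r.2.2.2

-- ===== PRECONDITION & SPEC =====
-- Pre_ excludes exactly the inputs where Python A raises IndexError: whenever len(d) ≥ 2 the loops
-- eventually read f[len(d)-1], so A raises iff len(f) < len(d) (B raises there too).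
def Pre_longest_descending (data : List Int × List Int) (tolerance : Int) : Prop :=
  data.1.length ≤ 1 ∨ data.1.length ≤ data.2.length
instance (data : List Int × List Int) (tolerance : Int) : Decidable (Pre_longest_descending data tolerance) := by unfold Pre_longest_descending; infer_instance
def pvWitness_longest_descending : (List Int × List Int) × Int := (([9, 7, 8, 5, 2], [9, 7, 8, 5, 2]), 2)

def Spec_longest_descending (data : List Int × List Int) (tolerance : Int) (out : List Int × List Int) : Prop := out = longest_descending_alt data tolerance
instance (data : List Int × List Int) (tolerance : Int) (out : List Int × List Int) : Decidable (Spec_longest_descending data tolerance out) := by unfold Spec_longest_descending; infer_instance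

-- ===== CLAIM (what is proved, stated in full; the proofs are below) =====
def Claim_equal_longest_descending : Prop := ∀ (data : List Int × List Int) (tolerance : Int), Dom_longest_descending data tolerance → Pre_longest_descending data tolerance → Spec_longest_descending data tolerance (longest_descending data tolerance)

-- ===== LEMMAS AND PROOFS =====

-- the post-loop trailing close of Source B, as a function of loopB's result
def finishB (d f : List Int) (r : Nat × Nat × Nat × (List Int × List Int)) : List Int × List Int :=
  if r.2.1 > r.2.2.1 then
    (PySem.List.slice d (some (r.1 : Int)) (some ((r.1 : Int) + (r.2.1 : Int))),
     PySem.List.slice f (some (r.1 : Int)) (some ((r.1 : Int) + (r.2.1 : Int))))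
  else r.2.2.2

-- the "close a segment of length seg starting at s" update shared by both programs
def mupd (seg m : Nat) : Nat := if seg > m then seg else m
def bupd (d f : List Int) (s seg m : Nat) (b : List Int × List Int) : List Int × List Int :=
  if seg > m then
    (PySem.List.slice d (some (s : Int)) (some ((s : Int) + (seg : Int))),
     PySem.List.slice f (some (s : Int)) (some ((s : Int) + (seg : Int))))
  else b

lemma alt_eq_finishB (data : List Int × List Int) (tolerance : Int) :
    longest_descending_alt data tolerance =
      finishB data.1 data.2 (loopB data.1 data.2 (data.1.length - 1) tolerance 0 0 0 0 0 ([], [])) := by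
  rfl

lemma innerA_ge (f : List Int) (limit : Nat) (tol : Int) :
    ∀ cur fluct seg, seg ≤ innerA f limit tol cur fluct seg := by
  suffices H : ∀ n cur, limit - cur ≤ n → ∀ (fluct : Int) (seg : Nat), seg ≤ innerA f limit tol cur fluct seg by
    intro cur fluct seg
    exact H (limit - cur) cur le_rfl fluct seg
  intro n
  induction n with
  | zero =>
    intro cur hle fluct seg
    have hcur : ¬ cur < limit := by omega
    rw [innerA, dif_neg hcur]
  | succ n ih =>
    intro cur hle fluct seg
    by_cases hcur : cur < limit
    · rw [innerA, dif_pos hcur]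
      by_cases hbr : (if f.getD cur 0 > f.getD (cur + 1) 0 then (0 : Int) else fluct + 1) ≥ tol
      · simp only [if_pos hbr]
        omega
      · simp only [if_neg hbr]
        have := ih (cur + 1) (by omega) (if f.getD cur 0 > f.getD (cur + 1) 0 then (0 : Int) else fluct + 1) (seg + 1)
        omega
    · rw [innerA, dif_neg hcur]

lemma innerA_succ_le (f : List Int) (limit : Nat) (tol : Int) (cur : Nat) (fluct : Int) (seg : Nat)
    (h : cur < limit) : seg + 1 ≤ innerA f limit tol cur fluct seg := by
  rw [innerA, dif_pos h]
  by_cases hbr : (if f.getD cur 0 > f.getD (cur + 1) 0 then (0 : Int) else fluct + 1) ≥ tol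
  · simp only [if_pos hbr]
    omega
  · simp only [if_neg hbr]
    exact innerA_ge ..

-- running B's loop from mid-segment state (i = cur, seg_start = s, length = cur - s) equals
-- closing the innerA-determined segment and restarting from its end
lemma inner_run (d f : List Int) (limit : Nat) (tol : Int) (s : Nat) :
    ∀ cur, s ≤ cur → ∀ fluct m b,
      finishB d f (loopB d f limit tol cur s (cur - s) fluct m b) =
        finishB d f (loopB d f limit tol (s + innerA f limit tol cur fluct (cur - s))
          (s + innerA f limit tol cur fluct (cur - s)) 0 0
          (mupd (innerA f limit tol cur fluct (cur - s)) m)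
          (bupd d f s (innerA f limit tol cur fluct (cur - s)) m b)) := by
  suffices H : ∀ n cur, limit - cur ≤ n → s ≤ cur → ∀ fluct m b,
      finishB d f (loopB d f limit tol cur s (cur - s) fluct m b) =
        finishB d f (loopB d f limit tol (s + innerA f limit tol cur fluct (cur - s))
          (s + innerA f limit tol cur fluct (cur - s)) 0 0
          (mupd (innerA f limit tol cur fluct (cur - s)) m)
          (bupd d f s (innerA f limit tol cur fluct (cur - s)) m b)) by
    intro cur hs fluct m b
    exact H (limit - cur) cur le_rfl hs fluct m b
  intro n
  induction n with
  | zero =>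
    intro cur hle hs fluct m b
    have hcur : ¬ cur < limit := by omega
    have hss : s + (cur - s) = cur := by omega
    rw [innerA]
    simp only [dif_neg hcur]
    rw [hss, loopB, loopB]
    simp only [dif_neg hcur]
    simp only [finishB, mupd, bupd]
    split_ifs <;> simp_all
  | succ n ih =>
    intro cur hle hs fluct m b
    by_cases hcur : cur < limit
    · rw [innerA]
      simp only [dif_pos hcur]
      rw [loopB]
      simp only [dif_pos hcur]
      by_cases hbr : (if f.getD cur 0 > f.getD (cur + 1) 0 then (0 : Int) else fluct + 1) ≥ tol
      · simp only [if_pos hbr]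
        have hss : s + (cur - s + 1) = cur + 1 := by omega
        rw [hss]
        simp only [mupd, bupd]
      · simp only [if_neg hbr]
        have h1 : cur - s + 1 = cur + 1 - s := by omega
        rw [h1]
        exact ih (cur + 1) (by omega) (by omega) _ m b
    · rw [innerA]
      simp only [dif_neg hcur]
      have hss : s + (cur - s) = cur := by omega
      rw [hss, loopB, loopB]
      simp only [dif_neg hcur]
      simp only [finishB, mupd, bupd]
      split_ifs <;> simp_all

lemma main_run (d f : List Int) (limit : Nat) (tol : Int) :
    ∀ s m bd bf, finishB d f (loopB d f limit tol s s 0 0 m (bd, bf)) = outerA d f limit tol s m bd bf := by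
  suffices H : ∀ n s, limit - s ≤ n → ∀ m bd bf,
      finishB d f (loopB d f limit tol s s 0 0 m (bd, bf)) = outerA d f limit tol s m bd bf by
    intro s m bd bf
    exact H (limit - s) s le_rfl m bd bf
  intro n
  induction n with
  | zero =>
    intro s hle m bd bf
    have hs : ¬ s < limit := by omega
    rw [loopB, outerA]
    simp only [dif_neg hs]
    simp [finishB]
  | succ n ih =>
    intro s hle m bd bf
    by_cases hs : s < limit
    · have hseg1 : 1 ≤ innerA f limit tol s 0 0 := innerA_succ_le f limit tol s 0 0 hs
      have hrun := inner_run d f limit tol s s le_rfl 0 m (bd, bf)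
      simp only [Nat.sub_self] at hrun
      rw [hrun, outerA]
      simp only [dif_pos hs]
      have hmax : s + max (innerA f limit tol s 0 0) 1 = s + innerA f limit tol s 0 0 := by omega
      rw [hmax]
      by_cases hgm : innerA f limit tol s 0 0 > m
      · simp only [mupd, bupd, if_pos hgm]
        exact ih (s + innerA f limit tol s 0 0) (by omega) _ _ _
      · simp only [mupd, bupd, if_neg hgm]
        exact ih (s + innerA f limit tol s 0 0) (by omega) _ _ _
    · rw [loopB, outerA]
      simp only [dif_neg hs]
      simp [finishB]

-- ===== VERDICT (by name: the statement is the Claim_ definition above) =====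
theorem longest_descending_spec : Claim_equal_longest_descending := by
  intro data tolerance _dom _pre
  unfold Spec_longest_descending
  rw [alt_eq_finishB, main_run]
  rfl
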